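-- pv_equiv track=rewrite | github.com/balloonio/algorithms | lintcode/ladder/Backpack/801_backpack_x.py | backPackX
-- ===== SOURCE A (Python) =====
-- def backPackX(n):
--     # write your code here
--     if n <= 0 :
--         return  0
--
--     COSTS = [150, 250, 350]
--     SIZE = 3
--     f = [[False]*(n+1) for _ in range(SIZE+1)]
--     f[0][0] = True
--
--     result = n
--     for i in range(1, SIZE+1):
--         for j in range(n+1):
--             f[i][j] |= f[i-1][j]
--             f[i][j] |= f[i][j-COSTS[i-1]] if j-COSTS[i-1] >= 0 else False
--
--             if i == SIZE:
--                 result = min(result, n-j) if f[i][j] else result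
--
--     return result
-- ===== SOURCE B (Python) =====
-- def backPackX(n):
--     # Closed form: reachable sums are 50*(3a+5b+7c); k=3a+5b+7c ranges over {0,3,5} plus all k>=6.
--     if n <= 0:
--         return 0
--     m = n // 50
--     if m >= 6 or m == 3 or m == 5:
--         k = m
--     elif m == 4:
--         k = 3
--     else:
--         k = 0
--     return n - 50 * k
-- ===== Notes on version B (the rewrite author's own statement) =====
-- stated objective: faster
-- what changed: Replaced the O(n) 2D boolean knapsack DP with an O(1) closed form: reachable sums are exactly 50k for k in {0,3,5} or k>=6, so the answer is n minus the largest such multiple of 50 below n.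
import Mathlib
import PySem

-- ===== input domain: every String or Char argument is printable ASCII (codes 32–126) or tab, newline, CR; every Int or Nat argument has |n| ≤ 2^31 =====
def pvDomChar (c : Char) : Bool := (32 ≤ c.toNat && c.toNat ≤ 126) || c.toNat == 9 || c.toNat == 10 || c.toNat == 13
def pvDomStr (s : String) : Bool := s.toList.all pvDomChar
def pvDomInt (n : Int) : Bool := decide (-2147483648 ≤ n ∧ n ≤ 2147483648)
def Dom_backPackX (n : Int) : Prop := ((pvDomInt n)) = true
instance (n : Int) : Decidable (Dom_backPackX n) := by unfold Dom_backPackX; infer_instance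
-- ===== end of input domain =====

-- B replaces A's O(n) boolean knapsack DP by an O(1) closed form over multiples of 50 (measured faster).


-- ===== PORT A =====
-- Inner loop of A: for j in range(n+1): cur = f[i-1][j] | (f[i][j-c] if j-c>=0 else False);
-- when i == SIZE also result = min(result, n-j) if cur else result.  All indices used are
-- nonnegative and in range, so Nat indexing with getD is exact here.
def pvRowLoop (prev : List Bool) (c N : Nat) (isLast : Bool) (res : Int) : List Bool × Int :=
  (List.range (N + 1)).foldl
    (fun st j =>
      let cur := prev.getD j false || (if c ≤ j then st.1.getD (j - c) false else false)
      (st.1 ++ [cur],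
       if isLast then (if cur then min st.2 ((N : Int) - j) else st.2) else st.2))
    ([], res)

def backPackX (n : Int) : Int :=
  if n ≤ 0 then 0
  else
    let N := n.toNat
    let COSTS : List Nat := [150, 250, 350]
    -- row 0 of f: [False]*(n+1) with f[0][0] = True
    let row0 : List Bool := (List.replicate (N + 1) false).set 0 true
    -- outer loop i = 1..SIZE; only the previous row and result are live state
    let st := (List.range 3).foldl
      (fun (st : List Bool × Int) i => pvRowLoop st.1 (COSTS.getD i 0) N (i == 2) st.2)
      (row0, n)
    st.2

-- ===== PORT B =====
def backPackX_alt (n : Int) : Int :=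
  if n ≤ 0 then 0
  else
    let m := PySem.Int.floordiv n 50
    let k : Int := if 6 ≤ m ∨ m = 3 ∨ m = 5 then m else if m = 4 then 3 else 0
    n - 50 * k

-- ===== PRECONDITION & SPEC =====
def Spec_backPackX (n : Int) (out : Int) : Prop := out = backPackX_alt n
instance (n : Int) (out : Int) : Decidable (Spec_backPackX n out) := by unfold Spec_backPackX; infer_instance

-- ===== CLAIM (what is proved, stated in full; the proofs are below) =====
def Claim_equal_backPackX : Prop := ∀ (n : Int), Dom_backPackX n → Spec_backPackX n (backPackX n)

-- ===== LEMMAS AND PROOFS =====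

-- reachability after adding an item of cost c (unbounded) to predicate p
def qf (p : Nat → Bool) (c : Nat) (j : Nat) : Bool :=
  p j || (if _h : 0 < c ∧ c ≤ j then qf p c (j - c) else false)
termination_by j
decreasing_by omega

theorem qf_unfold (p : Nat → Bool) (c j : Nat) (hc : 0 < c) :
    qf p c j = (p j || (if c ≤ j then qf p c (j - c) else false)) := by
  rw [qf]
  by_cases h : c ≤ j <;> simp [h, hc]

def q0 (j : Nat) : Bool := j == 0
def q1 : Nat → Bool := qf q0 150
def q2 : Nat → Bool := qf q1 250
def q3 : Nat → Bool := qf q2 350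

theorem q1_def : qf q0 150 = q1 := rfl
theorem q2_def : qf q1 250 = q2 := rfl
theorem q3_def : qf q2 350 = q3 := rfl

-- running maximum j < m with q j (0 if none)
def Kmax (q : Nat → Bool) : Nat → Nat
  | 0 => 0
  | m + 1 => if q m then m else Kmax q m

theorem Kmax_le (q : Nat → Bool) (m : Nat) : Kmax q m ≤ m := by
  induction m with
  | zero => simp [Kmax]
  | succ m ih => simp only [Kmax]; split <;> omega

theorem Kmax_succ_le (q : Nat → Bool) (m : Nat) : Kmax q (m + 1) ≤ m := by
  have := Kmax_le q m
  simp only [Kmax]; split <;> omega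

theorem Kmax_max (q : Nat → Bool) (m j : Nat) (hj : j < m) (hq : q j = true) :
    j ≤ Kmax q m := by
  induction m with
  | zero => omega
  | succ m ih =>
    simp only [Kmax]
    rcases Nat.lt_succ_iff_lt_or_eq.mp hj with h | h
    · have := ih h; split <;> omega
    · subst h; simp [hq]

theorem Kmax_mem (q : Nat → Bool) (m : Nat) (h0 : q 0 = true) : q (Kmax q m) = true := by
  induction m with
  | zero => simpa [Kmax]
  | succ m ih => simp only [Kmax]; split <;> simp_all

theorem getD_map_range (p : Nat → Bool) (L j : Nat) (hj : j < L) :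
    ((List.range L).map p).getD j false = p j := by
  rw [List.getD_eq_getElem?_getD, List.getElem?_map, List.getElem?_range hj]
  rfl

-- the scalar result accumulator of the last row
theorem resFold (q : Nat → Bool) (N m : Nat) :
    (List.range m).foldl (fun r j => if q j then min r ((N : Int) - j) else r) (N : Int)
      = (N : Int) - Kmax q m := by
  induction m with
  | zero => simp [Kmax]
  | succ m ih =>
    rw [List.range_succ, List.foldl_append, ih]
    have hle := Kmax_le q m
    simp only [List.foldl, Kmax]
    by_cases h : q m = true
    · simp only [h, if_pos]
      rw [min_eq_right (by omega)]
    · simp [h]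

-- fold invariant of pvRowLoop over a prefix range m
theorem rowLoop_aux (p : Nat → Bool) (c N : Nat) (hc : 0 < c) (isLast : Bool) (res : Int)
    (m : Nat) (hm : m ≤ N + 1) :
    (List.range m).foldl
      (fun st j =>
        let cur := ((List.range (N + 1)).map p).getD j false ||
          (if c ≤ j then st.1.getD (j - c) false else false)
        (st.1 ++ [cur],
         if isLast then (if cur then min st.2 ((N : Int) - j) else st.2) else st.2))
      ([], res)
    = ((List.range m).map (qf p c),
       if isLast then
         (List.range m).foldl (fun r j => if qf p c j then min r ((N : Int) - j) else r) res
       else res) := by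
  induction m with
  | zero => cases isLast <;> simp
  | succ m ih =>
    have hm' : m ≤ N + 1 := by omega
    rw [show List.range (m + 1) = List.range m ++ [m] from List.range_succ,
      List.foldl_append, List.foldl_append, ih hm']
    simp only [List.foldl]
    have hprev : ((List.range (N + 1)).map p).getD m false = p m :=
      getD_map_range p (N + 1) m (by omega)
    have hrow : ∀ h : c ≤ m,
        ((List.range m).map (qf p c)).getD (m - c) false = qf p c (m - c) := by
      intro h
      exact getD_map_range (qf p c) m (m - c) (by omega)
    have hcur : (((List.range (N + 1)).map p).getD m false ||
        (if c ≤ m then ((List.range m).map (qf p c)).getD (m - c) false else false))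
        = qf p c m := by
      rw [hprev, qf_unfold p c m hc]
      by_cases h : c ≤ m
      · rw [if_pos h, if_pos h, hrow h]
      · rw [if_neg h, if_neg h]
    rw [hcur, Prod.mk.injEq]
    refine ⟨by simp, ?_⟩
    cases isLast <;> simp

theorem rowLoop_eq (p : Nat → Bool) (c N : Nat) (hc : 0 < c) (isLast : Bool) (res : Int) :
    pvRowLoop ((List.range (N + 1)).map p) c N isLast res
    = ((List.range (N + 1)).map (qf p c),
       if isLast then
         (List.range (N + 1)).foldl (fun r j => if qf p c j then min r ((N : Int) - j) else r) res
       else res) := by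
  have := rowLoop_aux p c N hc isLast res (N + 1) (le_refl _)
  simpa [pvRowLoop] using this

theorem row0_eq (N : Nat) :
    (List.replicate (N + 1) false).set 0 true = (List.range (N + 1)).map q0 := by
  apply List.ext_getElem
  · simp
  · intro i h1 h2
    simp only [List.length_set, List.length_replicate] at h1
    simp [List.getElem_set, List.getElem_replicate, q0]
    cases i <;> simp

theorem qf_iff (p : Nat → Bool) (c : Nat) (hc : 0 < c) (j : Nat) :
    qf p c j = true ↔ ∃ a, a * c ≤ j ∧ p (j - a * c) = true := by
  induction j using Nat.strong_induction_on with
  | _ j ih =>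
    rw [qf_unfold p c j hc]
    constructor
    · intro h
      rcases Bool.or_eq_true_iff.mp h with h | h
      · exact ⟨0, by simpa using h⟩
      · by_cases hcj : c ≤ j
        · rw [if_pos hcj] at h
          rcases (ih (j - c) (by omega)).mp h with ⟨a, ha, hp⟩
          have hle1 : a * c + c ≤ j := (Nat.le_sub_iff_add_le hcj).mp ha
          refine ⟨a + 1, by have : (a + 1) * c = a * c + c := by ring
                            omega, ?_⟩
          have : j - (a + 1) * c = j - c - a * c := by
            have : (a + 1) * c = a * c + c := by ring
            omega
          rw [this]; exact hp
        · rw [if_neg hcj] at h; exact absurd h (by simp)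
    · rintro ⟨a, ha, hp⟩
      cases a with
      | zero => simp only [Nat.zero_mul, Nat.sub_zero] at hp; simp [hp]
      | succ a =>
        have hac : (a + 1) * c = a * c + c := by ring
        rw [hac] at ha
        have hcj : c ≤ j := by omega
        refine Bool.or_eq_true_iff.mpr (Or.inr ?_)
        rw [if_pos hcj]
        refine (ih (j - c) (by omega)).mpr ⟨a, by omega, ?_⟩
        have : j - c - a * c = j - (a + 1) * c := by rw [hac]; omega
        rw [this]; exact hp

theorem q1_iff (j : Nat) : q1 j = true ↔ ∃ a, j = 150 * a := by
  rw [q1, qf_iff q0 150 (by norm_num) j]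
  constructor
  · rintro ⟨a, ha, hp⟩
    simp only [q0, beq_iff_eq] at hp
    exact ⟨a, by omega⟩
  · rintro ⟨a, rfl⟩
    exact ⟨a, by omega, by simp [q0]; omega⟩

theorem q2_iff (j : Nat) : q2 j = true ↔ ∃ a b, j = 150 * a + 250 * b := by
  rw [q2, qf_iff q1 250 (by norm_num) j]
  constructor
  · rintro ⟨b, hb, hp⟩
    rcases (q1_iff _).mp hp with ⟨a, ha⟩
    exact ⟨a, b, by omega⟩
  · rintro ⟨a, b, rfl⟩
    exact ⟨b, by omega, (q1_iff _).mpr ⟨a, by omega⟩⟩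

theorem q3_iff (j : Nat) : q3 j = true ↔ ∃ a b c, j = 150 * a + 250 * b + 350 * c := by
  rw [q3, qf_iff q2 350 (by norm_num) j]
  constructor
  · rintro ⟨c, hc, hp⟩
    rcases (q2_iff _).mp hp with ⟨a, b, hab⟩
    exact ⟨a, b, c, by omega⟩
  · rintro ⟨a, b, c, rfl⟩
    exact ⟨c, by omega, (q2_iff _).mpr ⟨a, b, by omega⟩⟩

-- numerical-semigroup fact: k is 3a+5b+7c iff k ∈ {0,3,5} or k ≥ 6
theorem sem_rep (k : Nat) (hk : 6 ≤ k) : ∃ a b c, k = 3 * a + 5 * b + 7 * c := by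
  induction k using Nat.strong_induction_on with
  | _ k ih =>
    by_cases h9 : 9 ≤ k
    · rcases ih (k - 3) (by omega) (by omega) with ⟨a, b, c, h⟩
      exact ⟨a + 1, b, c, by omega⟩
    · interval_cases k
      · exact ⟨2, 0, 0, by omega⟩
      · exact ⟨0, 0, 1, by omega⟩
      · exact ⟨1, 1, 0, by omega⟩

theorem q3_sem (j : Nat) :
    q3 j = true ↔ ∃ k, j = 50 * k ∧ (k = 0 ∨ k = 3 ∨ k = 5 ∨ 6 ≤ k) := by
  rw [q3_iff]
  constructor
  · rintro ⟨a, b, c, rfl⟩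
    refine ⟨3 * a + 5 * b + 7 * c, by ring, ?_⟩
    rcases c with _ | c
    · rcases b with _ | b
      · rcases a with _ | _ | a <;> omega
      · rcases b with _ | b
        · rcases a with _ | a <;> omega
        · omega
    · omega
  · rintro ⟨k, rfl, hk⟩
    rcases hk with rfl | rfl | rfl | hk
    · exact ⟨0, 0, 0, by omega⟩
    · exact ⟨1, 0, 0, by omega⟩
    · exact ⟨0, 1, 0, by omega⟩
    · rcases sem_rep k hk with ⟨a, b, c, rfl⟩
      exact ⟨a, b, c, by ring⟩

-- the maximum reachable index below N+1 in closed form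
theorem Kmax_closed (N : Nat) :
    Kmax q3 (N + 1) =
      50 * (if 6 ≤ N / 50 ∨ N / 50 = 3 ∨ N / 50 = 5 then N / 50
            else if N / 50 = 4 then 3 else 0) := by
  set m := N / 50 with hm
  set gk := (if 6 ≤ m ∨ m = 3 ∨ m = 5 then m else if m = 4 then 3 else 0) with hgk
  have hgkm : gk ≤ m := by rw [hgk]; split_ifs <;> omega
  have hdm : 50 * m ≤ N := by omega
  have hle : 50 * gk ≤ N := by omega
  have hq3g : q3 (50 * gk) = true := by
    refine (q3_sem _).mpr ⟨gk, rfl, ?_⟩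
    rw [hgk]; split_ifs <;> omega
  have hmax : ∀ j, j ≤ N → q3 j = true → j ≤ 50 * gk := by
    intro j hj hq
    rcases (q3_sem j).mp hq with ⟨k, rfl, hk⟩
    have hkm : k ≤ m := by omega
    rw [hgk]; split_ifs with h1 h2 <;> omega
  have h0 : q3 0 = true := (q3_sem 0).mpr ⟨0, by omega, by omega⟩
  have h1 : Kmax q3 (N + 1) ≤ 50 * gk :=
    hmax _ (Kmax_succ_le q3 N) (Kmax_mem q3 (N + 1) h0)
  have h2 : 50 * gk ≤ Kmax q3 (N + 1) :=
    Kmax_max q3 (N + 1) (50 * gk) (by omega) hq3g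
  omega

theorem backPackX_spec : Claim_equal_backPackX := by
  intro n _
  unfold Spec_backPackX
  by_cases hn : n ≤ 0
  · simp [backPackX, backPackX_alt, hn]
  · have hn' : 0 < n := by omega
    set N := n.toNat with hN
    have hNn : (N : Int) = n := Int.toNat_of_nonneg (by omega)
    -- evaluate port A
    have hA : backPackX n = (N : Int) - Kmax q3 (N + 1) := by
      unfold backPackX
      rw [if_neg hn]
      show ((List.range 3).foldl
        (fun (st : List Bool × Int) i =>
          pvRowLoop st.1 ([150, 250, 350].getD i 0) N (i == 2) st.2)
        ((List.replicate (N + 1) false).set 0 true, n)).2 = _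
      rw [show List.range 3 = [0, 1, 2] from rfl]
      simp only [List.foldl, List.getD, List.getElem?_cons_zero, List.getElem?_cons_succ,
        Option.getD_some]
      rw [row0_eq]
      rw [show ((0 : Nat) == 2) = false from rfl, show ((1 : Nat) == 2) = false from rfl,
        show ((2 : Nat) == 2) = true from rfl]
      rw [rowLoop_eq q0 150 N (by norm_num) false n]
      simp only [if_neg (Bool.false_ne_true)]
      rw [q1_def, rowLoop_eq q1 250 N (by norm_num) false n]
      simp only [if_neg (Bool.false_ne_true)]
      rw [q2_def, rowLoop_eq q2 350 N (by norm_num) true n]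
      rw [q3_def, ← hNn, resFold q3 N (N + 1)]
      simp
    rw [hA, Kmax_closed N]
    -- evaluate port B
    unfold backPackX_alt
    rw [if_neg hn]
    have hfd : PySem.Int.floordiv n 50 = ((N / 50 : Nat) : Int) := by
      rw [← hNn]
      exact_mod_cast PySem.Int.floordiv_natCast N 50
    simp only [hfd]
    set m := N / 50 with hm
    by_cases h1 : 6 ≤ m ∨ m = 3 ∨ m = 5
    · have h1' : 6 ≤ ((m : Nat) : Int) ∨ ((m : Nat) : Int) = 3 ∨ ((m : Nat) : Int) = 5 := by
        rcases h1 with h | h | h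
        · left; exact_mod_cast h
        · right; left; exact_mod_cast congrArg (Nat.cast : Nat → Int) h
        · right; right; exact_mod_cast congrArg (Nat.cast : Nat → Int) h
      rw [if_pos h1, if_pos h1']
      push_cast
      omega
    · have h1' : ¬(6 ≤ ((m : Nat) : Int) ∨ ((m : Nat) : Int) = 3 ∨ ((m : Nat) : Int) = 5) := by
        push Not at h1 ⊢
        refine ⟨by exact_mod_cast h1.1, by exact_mod_cast h1.2.1, by exact_mod_cast h1.2.2⟩
      rw [if_neg h1, if_neg h1']
      by_cases h2 : m = 4
      · rw [if_pos h2, if_pos (by exact_mod_cast congrArg (Nat.cast : Nat → Int) h2)]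
        push_cast
        omega
      · rw [if_neg h2, if_neg (by intro h; exact h2 (by exact_mod_cast h))]
        push_cast
        omega
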